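-- pv_equiv track=rewrite | github.com/vtomole/sorger_shor | src/sorger_shor/shor.py | convCf2F
-- ===== SOURCE A (Python) =====
-- def convCf2F(cf):
--     r = False
--     cf_size = len(cf)
--     PArr = []
--     QArr = []
--     Pn = 0  # numerator
--     Qn = 1  # denominator
--
--     # Handling the empty continued fraction case
--     if cf_size == 0:
--         return r, Pn, Qn
--
--     # Handling a single-element continued fraction
--     elif cf_size == 1:
--         Pn = cf[0]
--         Qn = 1
--         return True, Pn, Qn
--
--     # Handling a two-element continued fraction
--     elif cf_size == 2:
--         Pn = cf[1] * (cf[0]) + 1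
--         Qn = cf[1] * 1 + 0
--         return True, Pn, Qn
--
--     # Initialize P0, P1, Q0, Q1
--     PArr.append(cf[0])                        # P0
--     PArr.append(cf[1] * cf[0] + 1)            # P1
--     QArr.append(1)                            # Q0
--     QArr.append(cf[1] * 1 + 0)                # Q1
--
--     # Calculate Pn, Qn for n >= 2
--     for idx in range(2, cf_size):
--         Pn = cf[idx] * PArr[idx-1] + PArr[idx-2]
--         Qn = cf[idx] * QArr[idx-1] + QArr[idx-2]
--         PArr.append(Pn)
--         QArr.append(Qn)
--
--     return True, Pn, Qn
-- ===== SOURCE B (Python) =====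
-- def convCf2F(cf):
--     # Back-substitution: fold the continued fraction from the LAST coefficient
--     # backwards, maintaining a single (numerator, denominator) pair.
--     if not cf:
--         return False, 0, 1
--     num, den = 1, 0
--     for a in reversed(cf):
--         num, den = a * num + den, num
--     return True, num, den
-- ===== Notes on version B (the rewrite author's own statement) =====
-- stated objective: alternative
-- what changed: Replaces the forward three-term convergent recurrence with its index-addressed arrays and three length special-cases by back-substitution: a right-to-left fold over the coefficients maintaining one (numerator, denominator) pair, with only the empty-input guard.
import Mathlib
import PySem

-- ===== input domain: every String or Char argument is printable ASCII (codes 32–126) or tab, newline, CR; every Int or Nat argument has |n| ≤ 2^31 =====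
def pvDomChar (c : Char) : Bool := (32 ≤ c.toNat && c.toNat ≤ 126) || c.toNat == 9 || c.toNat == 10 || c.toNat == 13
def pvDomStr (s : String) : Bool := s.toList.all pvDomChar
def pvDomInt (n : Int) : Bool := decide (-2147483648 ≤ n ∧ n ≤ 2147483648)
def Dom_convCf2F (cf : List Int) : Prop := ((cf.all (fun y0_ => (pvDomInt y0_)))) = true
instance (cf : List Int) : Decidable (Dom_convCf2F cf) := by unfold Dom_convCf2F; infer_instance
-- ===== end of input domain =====

-- B replaces A's forward convergent recurrence over two growing arrays (with three
-- length special-cases) by a right-to-left back-substitution fold over one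
-- (numerator, denominator) pair; objective: alternative (same O(n) time, O(1) space).


-- ===== PORT A =====
-- A's loop body kept as a helper: state (PArr, QArr, Pn, Qn).
-- All of A's Python indexing is in range on every input, so pyGetD (pyGet? with a default) is exact here.
def stepA (cf : List Int) (s : List Int × List Int × Int × Int) (idx : Int) :
    List Int × List Int × Int × Int :=
  let Pn := PySem.List.pyGetD cf idx 0 * PySem.List.pyGetD s.1 (idx - 1) 0 +
            PySem.List.pyGetD s.1 (idx - 2) 0
  let Qn := PySem.List.pyGetD cf idx 0 * PySem.List.pyGetD s.2.1 (idx - 1) 0 +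
            PySem.List.pyGetD s.2.1 (idx - 2) 0
  (s.1 ++ [Pn], s.2.1 ++ [Qn], Pn, Qn)

def convCf2F (cf : List Int) : Bool × Int × Int :=
  let r := false
  let cfSize : Int := cf.length
  let Pn : Int := 0
  let Qn : Int := 1
  if cfSize = 0 then (r, Pn, Qn)
  else if cfSize = 1 then (true, PySem.List.pyGetD cf 0 0, 1)
  else if cfSize = 2 then
    (true, PySem.List.pyGetD cf 1 0 * PySem.List.pyGetD cf 0 0 + 1,
           PySem.List.pyGetD cf 1 0 * 1 + 0)
  else
    let PArr : List Int := [PySem.List.pyGetD cf 0 0,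
                            PySem.List.pyGetD cf 1 0 * PySem.List.pyGetD cf 0 0 + 1]
    let QArr : List Int := [1, PySem.List.pyGetD cf 1 0 * 1 + 0]
    let st := (PySem.List.pyRange 2 cfSize 1).foldl (stepA cf) (PArr, QArr, Pn, Qn)
    (true, st.2.2.1, st.2.2.2)

-- ===== PORT B =====
-- B's loop body: state (num, den), updated right-to-left (back-substitution).
def stepB (s : Int × Int) (a : Int) : Int × Int := (a * s.1 + s.2, s.1)

def convCf2F_alt (cf : List Int) : Bool × Int × Int :=
  if cf.length = 0 then (false, 0, 1)
  else
    let st := cf.reverse.foldl stepB (1, 0)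
    (true, st.1, st.2)

-- ===== PRECONDITION & SPEC =====
def Spec_convCf2F (cf : List Int) (out : Bool × Int × Int) : Prop := out = convCf2F_alt cf
instance (cf : List Int) (out : Bool × Int × Int) : Decidable (Spec_convCf2F cf out) := by unfold Spec_convCf2F; infer_instance

-- ===== CLAIM (what is proved, stated in full; the proofs are below) =====
def Claim_equal_convCf2F : Prop := ∀ (cf : List Int), Dom_convCf2F cf → Spec_convCf2F cf (convCf2F cf)

-- ===== LEMMAS AND PROOFS =====

-- Proof-only forward rolling recurrence (state p2, p1, q2, q1), the bridge between
-- A's array-indexed forward loop and B's backward fold.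
def stepF (s : Int × Int × Int × Int) (a : Int) : Int × Int × Int × Int :=
  (s.2.1, a * s.2.1 + s.1, s.2.2.2, a * s.2.2.2 + s.2.2.1)

-- Structural back-substitution: convR l = (num, den) of the tail fraction.
def convR : List Int → Int × Int
  | [] => (1, 0)
  | a :: t => (a * (convR t).1 + (convR t).2, (convR t).1)

theorem revfold_eq_convR (l : List Int) : l.reverse.foldl stepB (1, 0) = convR l := by
  induction l with
  | nil => rfl
  | cons a t ih => simp [List.foldl_append, ih, stepB, convR]

theorem convR_cons (a : Int) (t : List Int) :
    convR (a :: t) = (a * (convR t).1 + (convR t).2, (convR t).1) := rfl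

theorem fwdfold_eq_convR (l : List Int) :
    ∀ p2 p1 q2 q1 : Int,
      ((l.foldl stepF (p2, p1, q2, q1)).2.1, (l.foldl stepF (p2, p1, q2, q1)).2.2.2) =
        ((convR l).1 * p1 + (convR l).2 * p2, (convR l).1 * q1 + (convR l).2 * q2) := by
  induction l with
  | nil => intro p2 p1 q2 q1; simp [convR]
  | cons a t ih =>
    intro p2 p1 q2 q1
    simp only [List.foldl_cons, stepF, convR_cons]
    have h := ih p1 (a * p1 + p2) q1 (a * q1 + q2)
    rw [Prod.mk.injEq] at h ⊢
    obtain ⟨h1, h2⟩ := h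
    constructor
    · rw [h1]; ring
    · rw [h2]; ring

theorem getD_mid (Pp : List Int) (x y : Int) :
    PySem.List.pyGetD (Pp ++ [x, y]) (Pp.length : Int) 0 = x := by
  rw [PySem.List.pyGetD_natCast]; simp [List.getD]

theorem getD_last (Pp : List Int) (x y : Int) :
    PySem.List.pyGetD (Pp ++ [x, y]) ((Pp.length : Int) + 1) 0 = y := by
  have h : ((Pp.length : Int) + 1) = ((Pp.length + 1 : Nat) : Int) := by push_cast; ring
  rw [h, PySem.List.pyGetD_natCast]; simp [List.getD]

theorem getD_drop (cf t : List Int) (a : Int) (k : Nat) (h : cf.drop k = a :: t) :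
    PySem.List.pyGetD cf (k : Int) 0 = a := by
  rw [PySem.List.pyGetD_natCast]
  have h0 : (cf.drop k)[0]? = cf[k+0]? := List.getElem?_drop
  rw [h] at h0
  simp only [List.getElem?_cons_zero, Nat.add_zero] at h0
  simp [List.getD, ← h0]

-- Loop invariant: A's fold over the remaining indices, with the arrays ending in the
-- last two convergents, projects to the forward rolling fold over the remaining coefficients.
theorem loopA_eq (cf : List Int) (rest : List Int) :
    ∀ (Pp Qp : List Int) (p2 p1 q2 q1 pn qn : Int),
    Qp.length = Pp.length →
    cf.drop (Pp.length + 2) = rest →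
    ((PySem.List.pyRange ((Pp.length : Int) + 2) (cf.length : Int) 1).foldl (stepA cf)
        (Pp ++ [p2, p1], Qp ++ [q2, q1], pn, qn)).2.2 =
      (if rest.isEmpty then (pn, qn)
       else ((rest.foldl stepF (p2, p1, q2, q1)).2.1,
             (rest.foldl stepF (p2, p1, q2, q1)).2.2.2)) := by
  induction rest with
  | nil =>
    intro Pp Qp p2 p1 q2 q1 pn qn hlen hdrop
    have hk : cf.length ≤ Pp.length + 2 := by
      by_contra hlt
      have := List.length_drop (l := cf) (i := Pp.length + 2)
      rw [hdrop] at this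
      simp at this; omega
    rw [PySem.List.pyRange_one_eq_nil (by omega)]
    simp
  | cons a t ih =>
    intro Pp Qp p2 p1 q2 q1 pn qn hlen hdrop
    have hk : Pp.length + 2 < cf.length := by
      have := List.length_drop (l := cf) (i := Pp.length + 2)
      rw [hdrop] at this
      simp at this; omega
    rw [PySem.List.pyRange_one_cons (by omega)]
    rw [List.foldl_cons]
    have hcf : PySem.List.pyGetD cf ((Pp.length : Int) + 2) 0 = a := by
      have h2 : ((Pp.length : Int) + 2) = ((Pp.length + 2 : Nat) : Int) := by push_cast; ring
      rw [h2]; exact getD_drop cf t a _ hdrop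
    have e3 : (Qp.length : Int) = (Pp.length : Int) := by exact_mod_cast hlen
    have gq2 : PySem.List.pyGetD (Qp ++ [q2, q1]) ((Pp.length : Int)) 0 = q2 := by
      rw [← e3]; exact getD_mid Qp q2 q1
    have gq1 : PySem.List.pyGetD (Qp ++ [q2, q1]) ((Pp.length : Int) + 1) 0 = q1 := by
      rw [← e3]; exact getD_last Qp q2 q1
    have e1 : ((Pp.length : Int) + 2 - 1) = (Pp.length : Int) + 1 := by ring
    have e2 : ((Pp.length : Int) + 2 - 2) = (Pp.length : Int) := by ring
    have hstep : stepA cf (Pp ++ [p2, p1], Qp ++ [q2, q1], pn, qn) ((Pp.length : Int) + 2) =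
        ((Pp ++ [p2]) ++ [p1, a * p1 + p2], (Qp ++ [q2]) ++ [q1, a * q1 + q2],
          a * p1 + p2, a * q1 + q2) := by
      simp only [stepA, e1, e2, hcf, getD_mid, getD_last, gq2, gq1]
      simp
    rw [hstep]
    have harr : ((Pp ++ [p2]).length : Int) + 2 = (Pp.length : Int) + 2 + 1 := by
      simp; ring
    have hdrop' : cf.drop ((Pp ++ [p2]).length + 2) = t := by
      have h3 : (Pp ++ [p2]).length + 2 = (Pp.length + 2) + 1 := by simp
      rw [h3, ← List.drop_drop, hdrop]
      simp
    have := ih (Pp ++ [p2]) (Qp ++ [q2]) p1 (a * p1 + p2) q1 (a * q1 + q2)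
      (a * p1 + p2) (a * q1 + q2) (by simp [hlen]) hdrop'
    rw [harr] at this
    rw [this]
    cases t with
    | nil => simp [stepF]
    | cons b u => simp [stepF]

-- ===== VERDICT (by name: the statement is the Claim_ definition above) =====
theorem convCf2F_spec : Claim_equal_convCf2F := by
  intro cf _
  show convCf2F cf = convCf2F_alt cf
  match cf with
  | [] => rfl
  | [a] =>
    have h0 : PySem.List.pyGetD [a] 0 0 = a := by
      simp [PySem.List.pyGetD, PySem.List.pyGet?, PySem.List.pyIdx?]
    simp [convCf2F, convCf2F_alt, stepB, h0]
  | [a, b] =>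
    have h0 : PySem.List.pyGetD [a, b] 0 0 = a := by
      simp [PySem.List.pyGetD, PySem.List.pyGet?, PySem.List.pyIdx?]
    have h1 : PySem.List.pyGetD [a, b] 1 0 = b := by
      simp [PySem.List.pyGetD, PySem.List.pyGet?, PySem.List.pyIdx?]
    simp [convCf2F, convCf2F_alt, stepB, h0, h1]
    ring
  | a :: b :: c :: t =>
    have hmain := loopA_eq (a :: b :: c :: t) (c :: t) []
      [] (PySem.List.pyGetD (a :: b :: c :: t) 0 0)
      (PySem.List.pyGetD (a :: b :: c :: t) 1 0 * PySem.List.pyGetD (a :: b :: c :: t) 0 0 + 1)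
      1 (PySem.List.pyGetD (a :: b :: c :: t) 1 0 * 1 + 0) 0 1 rfl rfl
    simp only [List.length_nil, Nat.cast_zero, zero_add, List.nil_append,
      List.isEmpty_cons, Bool.false_eq_true, if_false] at hmain
    simp only [convCf2F, convCf2F_alt]
    rw [if_neg (by simp; omega), if_neg (by simp; omega), if_neg (by simp; omega),
        if_neg (by simp)]
    rw [hmain]
    have hget0 : PySem.List.pyGetD (a :: b :: c :: t) 0 0 = a := by
      simp [PySem.List.pyGetD, PySem.List.pyGet?, PySem.List.pyIdx?]
      rw [if_pos (by omega)]
      simp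
    have hget1 : PySem.List.pyGetD (a :: b :: c :: t) 1 0 = b := by
      simp [PySem.List.pyGetD, PySem.List.pyGet?, PySem.List.pyIdx?]
      rw [if_pos (by omega)]
      simp
    rw [hget0, hget1]
    have hfwd := fwdfold_eq_convR (c :: t) a (b * a + 1) 1 (b * 1 + 0)
    rw [Prod.mk.injEq] at hfwd
    obtain ⟨h1, h2⟩ := hfwd
    rw [revfold_eq_convR, convR_cons, convR_cons]
    rw [Prod.mk.injEq]
    refine ⟨rfl, ?_⟩
    rw [Prod.mk.injEq]
    constructor
    · rw [h1]; ring
    · rw [h2]; ring
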